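-- pv_equiv track=rewrite | github.com/robban112/AdventOfCode2018 | 07/main.py | getNextSteps
-- ===== SOURCE A (Python) =====
-- def getNextSteps(visible, visited, order):
--     unlocked = []
--     for v in visible:
--         isUnlocked = True
--         for o in order:
--             if v in order[o] and not o in visited:
--                 isUnlocked = False
--         if isUnlocked:
--             unlocked.append(v)
--     return unlocked
-- ===== SOURCE B (Python) =====
-- def getNextSteps(visible, visited, order):
--     blocked = set()
--     for o in order:
--         if o not in visited:
--             blocked.update(order[o])
--     return [v for v in visible if v not in blocked]
-- ===== Notes on version B (the rewrite author's own statement) =====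
-- stated objective: faster
-- what changed: Replaces the nested visible-by-order scan with one pass that builds a single 'blocked' set from the unvisited keys' prerequisite lists, then a flat membership filter over visible.
import Mathlib
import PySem

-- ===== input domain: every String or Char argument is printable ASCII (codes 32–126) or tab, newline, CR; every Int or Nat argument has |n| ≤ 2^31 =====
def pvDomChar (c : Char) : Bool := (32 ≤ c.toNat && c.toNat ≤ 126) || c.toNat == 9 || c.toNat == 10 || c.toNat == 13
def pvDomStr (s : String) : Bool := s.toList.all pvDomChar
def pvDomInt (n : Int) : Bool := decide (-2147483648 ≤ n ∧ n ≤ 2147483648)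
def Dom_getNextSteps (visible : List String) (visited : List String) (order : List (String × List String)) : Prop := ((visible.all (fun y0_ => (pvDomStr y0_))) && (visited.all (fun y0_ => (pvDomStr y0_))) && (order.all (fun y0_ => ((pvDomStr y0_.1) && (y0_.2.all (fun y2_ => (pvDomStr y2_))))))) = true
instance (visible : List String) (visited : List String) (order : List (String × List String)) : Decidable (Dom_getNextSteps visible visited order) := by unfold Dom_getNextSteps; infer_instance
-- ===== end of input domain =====

-- B replaces A's nested visible×order scan by one pass building a 'blocked' set, then a flat filter over visible (asymptotically faster).

-- ===== PORT A =====
-- literal transliteration: for v in visible: inner loop over the dict's items sets isUnlocked;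
-- append v when it stayed True.  (order is a dict, so each key's value is that pair's list.)
def getNextSteps (visible : List String) (visited : List String) (order : List (String × List String)) : List String :=
  visible.foldl
    (fun unlocked v =>
      let isUnlocked :=
        order.foldl (fun b p => if v ∈ p.2 ∧ p.1 ∉ visited then false else b) true
      if isUnlocked then unlocked ++ [v] else unlocked)
    []

-- ===== PORT B =====
-- blocked = set(); for o in order: if o not in visited: blocked.update(order[o]); filter visible.
def getNextSteps_alt (visible : List String) (visited : List String) (order : List (String × List String)) : List String :=
  let blocked : PySem.Set String :=
    order.foldl (fun s p => if p.1 ∉ visited then PySem.Set.update s p.2 else s) PySem.Set.empty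
  visible.filter (fun v => !(blocked.contains v))

-- ===== PRECONDITION & SPEC =====
def Spec_getNextSteps (visible : List String) (visited : List String) (order : List (String × List String)) (out : List String) : Prop := out = getNextSteps_alt visible visited order
instance (visible : List String) (visited : List String) (order : List (String × List String)) (out : List String) : Decidable (Spec_getNextSteps visible visited order out) := by unfold Spec_getNextSteps; infer_instance

-- ===== CLAIM (what is proved, stated in full; the proofs are below) =====
def Claim_equal_getNextSteps : Prop := ∀ (visible : List String) (visited : List String) (order : List (String × List String)), Dom_getNextSteps visible visited order → Spec_getNextSteps visible visited order (getNextSteps visible visited order)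

-- ===== LEMMAS AND PROOFS =====

theorem innerFold_eq (visited : List String) (v : String) (order : List (String × List String)) (b : Bool) :
    order.foldl (fun b p => if v ∈ p.2 ∧ p.1 ∉ visited then false else b) b
      = (b && decide (∀ p ∈ order, ¬ (v ∈ p.2 ∧ p.1 ∉ visited))) := by
  induction order generalizing b with
  | nil => simp
  | cons p rest ih =>
    rw [List.foldl_cons]
    by_cases h : v ∈ p.2 ∧ p.1 ∉ visited
    · rw [if_pos h, ih]
      have hff : ¬ (∀ q ∈ p :: rest, ¬ (v ∈ q.2 ∧ q.1 ∉ visited)) :=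
        fun hall => hall p List.mem_cons_self h
      rw [decide_eq_false hff]
      simp
    · rw [if_neg h, ih]
      by_cases hr : ∀ q ∈ rest, ¬ (v ∈ q.2 ∧ q.1 ∉ visited)
      · have hcc : ∀ q ∈ p :: rest, ¬ (v ∈ q.2 ∧ q.1 ∉ visited) := List.forall_mem_cons.mpr ⟨h, hr⟩
        rw [decide_eq_true hr, decide_eq_true hcc]
      · have hcf : ¬ (∀ q ∈ p :: rest, ¬ (v ∈ q.2 ∧ q.1 ∉ visited)) :=
          fun hall => hr (fun q hq => hall q (List.mem_cons_of_mem _ hq))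
        rw [decide_eq_false hr, decide_eq_false hcf]

theorem mem_blockedFold (visited : List String) (order : List (String × List String))
    (s : PySem.Set String) (x : String) :
    (x ∈ order.foldl (fun s p => if p.1 ∉ visited then PySem.Set.update s p.2 else s) s)
      ↔ (x ∈ s ∨ ∃ p ∈ order, p.1 ∉ visited ∧ x ∈ p.2) := by
  induction order generalizing s with
  | nil => simp
  | cons p rest ih =>
    rw [List.foldl_cons]
    by_cases h : p.1 ∈ visited
    · rw [if_neg (not_not_intro h), ih]
      constructor
      · rintro (hs | ⟨q, hq, hnv, hx⟩)
        · exact Or.inl hs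
        · exact Or.inr ⟨q, List.mem_cons_of_mem _ hq, hnv, hx⟩
      · rintro (hs | ⟨q, hq, hnv, hx⟩)
        · exact Or.inl hs
        · rcases List.mem_cons.mp hq with rfl | hq'
          · exact absurd h hnv
          · exact Or.inr ⟨q, hq', hnv, hx⟩
    · rw [if_pos h, ih, PySem.Set.mem_update]
      constructor
      · rintro ((hs | hp) | ⟨q, hq, hnv, hx⟩)
        · exact Or.inl hs
        · exact Or.inr ⟨p, List.mem_cons_self, h, hp⟩
        · exact Or.inr ⟨q, List.mem_cons_of_mem _ hq, hnv, hx⟩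
      · rintro (hs | ⟨q, hq, hnv, hx⟩)
        · exact Or.inl (Or.inl hs)
        · rcases List.mem_cons.mp hq with rfl | hq'
          · exact Or.inl (Or.inr hx)
          · exact Or.inr ⟨q, hq', hnv, hx⟩

theorem outerFold_eq (visited : List String) (order : List (String × List String))
    (visible : List String) (acc : List String) :
    visible.foldl
      (fun unlocked v =>
        let isUnlocked :=
          order.foldl (fun b p => if v ∈ p.2 ∧ p.1 ∉ visited then false else b) true
        if isUnlocked then unlocked ++ [v] else unlocked)
      acc
    = acc ++ visible.filter
        (fun v => decide (∀ p ∈ order, ¬ (v ∈ p.2 ∧ p.1 ∉ visited))) := by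
  induction visible generalizing acc with
  | nil => simp
  | cons v rest ih =>
    rw [List.foldl_cons, List.filter_cons, ih]
    simp only [innerFold_eq, Bool.true_and]
    by_cases h : ∀ p ∈ order, ¬ (v ∈ p.2 ∧ p.1 ∉ visited)
    · rw [decide_eq_true h]
      simp
    · rw [decide_eq_false h]
      simp

-- ===== VERDICT (by name: the statement is the Claim_ definition above) =====
theorem getNextSteps_spec : Claim_equal_getNextSteps := by
  intro visible visited order _
  unfold Spec_getNextSteps getNextSteps getNextSteps_alt
  rw [outerFold_eq]
  simp only [List.nil_append]
  apply List.filter_congr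
  intro v _
  have hb := mem_blockedFold visited order PySem.Set.empty v
  by_cases h : ∀ p ∈ order, ¬ (v ∈ p.2 ∧ p.1 ∉ visited)
  · have hnm : v ∉ order.foldl (fun s p => if p.1 ∉ visited then PySem.Set.update s p.2 else s) PySem.Set.empty := by
      rw [hb]
      rintro (hs | ⟨q, hq, hnv, hx⟩)
      · simp [PySem.Set.empty] at hs
      · exact h q hq ⟨hx, hnv⟩
    rw [decide_eq_true h]
    simp only [PySem.Set.contains, List.contains_eq_mem]
    simp only [ite_not, PySem.Set.empty] at hnm
    simp [hnm]
  · have hm : v ∈ order.foldl (fun s p => if p.1 ∉ visited then PySem.Set.update s p.2 else s) PySem.Set.empty := by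
      rcases not_forall.mp h with ⟨q, hq⟩
      rcases Classical.em (q ∈ order) with hqo | hqo
      · rcases Classical.em (v ∈ q.2 ∧ q.1 ∉ visited) with ⟨hx, hnv⟩ | hc
        · exact hb.mpr (Or.inr ⟨q, hqo, hnv, hx⟩)
        · exact absurd (fun _ => hc) hq
      · exact absurd (fun hmem => absurd hmem hqo) hq
    rw [decide_eq_false h]
    simp only [PySem.Set.contains, List.contains_eq_mem]
    simp only [ite_not, PySem.Set.empty] at hm
    simp [hm]
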